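-- pv_equiv track=rewrite | github.com/EyeSeeTea/d2-sync-report | d2_sync_report/data/repositories/d2_logs_parser/import_summaries.py | parse_with_brackets
-- ===== SOURCE A (Python) =====
-- from typing import Iterator, List, Optional
--
-- def parse_with_brackets(keyword: str, text: str) -> Iterator[str]:
--     """
--     Parses text for occurrences of a "keyword{...}", supports balanced braces.
--
--     For example, it can parse ImportSummary blocks like:
--
--         ImportSummary{some error} -> "some error"
--         ImportConflict{{error 1}, {error2}} -> "{error 1}, {error2}"
--     """
--     keyword2 = keyword + "{"
--     i = 0
--
--     while i < len(text):
--         start = text.find(keyword2, i)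
--         if start == -1:
--             break
--
--         brace_level = 1
--         j = start + len(keyword2)
--         while j < len(text) and brace_level > 0:
--             if text[j] == "{":
--                 brace_level += 1
--             elif text[j] == "}":
--                 brace_level -= 1
--             j += 1
--
--         if brace_level == 0:
--             content = text[start + len(keyword2) : j - 1]
--             yield content
--             i = j
--         else:
--             # Unbalanced braces; abort
--             break
-- ===== SOURCE B (Python) =====
-- def parse_with_brackets(keyword, text):
--     """Two-pass: precompute global brace matching with a stack, then jump between
--     matched braces via the table instead of counting depth per occurrence."""
--     match = {}
--     stack = []
--     for idx, ch in enumerate(text):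
--         if ch == "{":
--             stack.append(idx)
--         elif ch == "}":
--             if stack:
--                 match[stack.pop()] = idx
--     keyword2 = keyword + "{"
--     out = []
--     i = 0
--     while True:
--         start = text.find(keyword2, i)
--         if start == -1:
--             break
--         open_idx = start + len(keyword)
--         if open_idx not in match:
--             break
--         close = match[open_idx]
--         out.append(text[open_idx + 1 : close])
--         i = close + 1
--     return out
-- ===== Notes on version B (the rewrite author's own statement) =====
-- stated objective: alternative
-- what changed: Replaces A's per-occurrence inner brace-counting loop by a different algorithm: one preliminary stack pass builds a global open-to-close brace matching table, and the extraction loop then just looks up each keyword's opening brace in the table and jumps to its matching close (no depth counter in the extraction loop).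
import Mathlib
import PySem

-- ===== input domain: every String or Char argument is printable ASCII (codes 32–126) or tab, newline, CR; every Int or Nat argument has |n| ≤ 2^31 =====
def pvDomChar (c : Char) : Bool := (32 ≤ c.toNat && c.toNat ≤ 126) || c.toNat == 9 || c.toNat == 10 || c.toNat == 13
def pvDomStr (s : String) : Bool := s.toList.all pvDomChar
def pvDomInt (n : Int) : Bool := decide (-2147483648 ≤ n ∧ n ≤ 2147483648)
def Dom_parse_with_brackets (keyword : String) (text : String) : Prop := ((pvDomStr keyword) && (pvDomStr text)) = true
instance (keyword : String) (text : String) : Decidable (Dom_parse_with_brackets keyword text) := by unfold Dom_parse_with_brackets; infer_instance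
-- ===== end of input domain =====

-- B replaces A's per-occurrence inner brace-counting loop by a two-pass algorithm: a stack pass
-- precomputes a global open-brace -> close-brace matching table, and the extraction loop looks
-- each keyword's opening brace up in the table and jumps to its matching close (alternative
-- algorithm, same asymptotic cost). Loops are ported with an explicit fuel counter (a totality
-- guard only: each loop advances its index, so the given fuel always suffices and the ports are
-- exact on every input).


-- ===== PORT A =====
-- A's inner loop: `while j < len(text) and brace_level > 0:` counting '{' / '}'; returns the final (j, brace_level).
def pvBraceScan (t : List Char) (fuel : Nat) (j : Nat) (lvl : Int) : Nat × Int :=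
  match fuel with
  | 0 => (j, lvl)
  | f + 1 =>
    if h : j < t.length ∧ 0 < lvl then
      pvBraceScan t f (j + 1)
        (if t[j]'h.1 = '{' then lvl + 1 else if t[j]'h.1 = '}' then lvl - 1 else lvl)
    else (j, lvl)

-- A's outer loop: start = text.find(keyword2, i) (= PySem.Chars.findFrom, exact), the brace scan,
-- then yield text[start+len(keyword2) : j-1] and continue at i = j, or break.
def pvAOuter (kw t : List Char) (fuel : Nat) (i : Nat) : List String :=
  match fuel with
  | 0 => []
  | f + 1 =>
    if i < t.length then
      if PySem.Chars.findFrom t (kw ++ ['{']) (i : Int) none = -1 then []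
      else
        if (pvBraceScan t t.length ((PySem.Chars.findFrom t (kw ++ ['{']) (i : Int) none).toNat + (kw ++ ['{']).length) 1).2 = 0 then
          String.mk (PySem.List.slice t
              (some (((PySem.Chars.findFrom t (kw ++ ['{']) (i : Int) none).toNat + (kw ++ ['{']).length : Nat) : Int))
              (some (((pvBraceScan t t.length ((PySem.Chars.findFrom t (kw ++ ['{']) (i : Int) none).toNat + (kw ++ ['{']).length) 1).1 : Int) - 1)))
            :: pvAOuter kw t f (pvBraceScan t t.length ((PySem.Chars.findFrom t (kw ++ ['{']) (i : Int) none).toNat + (kw ++ ['{']).length) 1).1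
        else []
    else []

def parse_with_brackets (keyword : String) (text : String) : List String :=
  pvAOuter keyword.toList text.toList text.toList.length 0

-- ===== PORT B =====
-- B's pass 1: `for idx, ch in enumerate(text): if '{' push idx; if '}' pop (if any) into match`.
def pvPass1 (rest : List Char) (idx : Nat) (stack : List Nat) (m : PySem.Dict Int Int) : PySem.Dict Int Int :=
  match rest with
  | [] => m
  | c :: cs =>
    if c = '{' then pvPass1 cs (idx + 1) (idx :: stack) m
    else if c = '}' then
      match stack with
      | [] => pvPass1 cs (idx + 1) [] m
      | p :: ps => pvPass1 cs (idx + 1) ps (m.insert (p : Int) (idx : Int))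
    else pvPass1 cs (idx + 1) stack m

-- B's pass 2: `while True: start = text.find(keyword2, i); if open_idx not in match: break;
-- close = match[open_idx]; i = close + 1`. The `match[open_idx]` subscript is guarded by the
-- `not in` test, so it is ported as getD behind the contains check (exact here: no KeyError).
def pvBOuter (kw t : List Char) (m : PySem.Dict Int Int) (fuel : Nat) (i : Nat) : List String :=
  match fuel with
  | 0 => []
  | f + 1 =>
    if PySem.Chars.findFrom t (kw ++ ['{']) (i : Int) none = -1 then []
    else if m.contains (((PySem.Chars.findFrom t (kw ++ ['{']) (i : Int) none).toNat + kw.length : Nat) : Int) = false then []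
    else
      String.mk (PySem.List.slice t
          (some (((PySem.Chars.findFrom t (kw ++ ['{']) (i : Int) none).toNat + kw.length + 1 : Nat) : Int))
          (some (m.getD (((PySem.Chars.findFrom t (kw ++ ['{']) (i : Int) none).toNat + kw.length : Nat) : Int) 0)))
        :: pvBOuter kw t m f ((m.getD (((PySem.Chars.findFrom t (kw ++ ['{']) (i : Int) none).toNat + kw.length : Nat) : Int) 0).toNat + 1)

def parse_with_brackets_alt (keyword : String) (text : String) : List String :=
  pvBOuter keyword.toList text.toList (pvPass1 text.toList 0 [] PySem.Dict.empty) (text.toList.length + 1) 0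

-- ===== PRECONDITION & SPEC =====
def Spec_parse_with_brackets (keyword : String) (text : String) (out : List String) : Prop := out = parse_with_brackets_alt keyword text
instance (keyword : String) (text : String) (out : List String) : Decidable (Spec_parse_with_brackets keyword text out) := by unfold Spec_parse_with_brackets; infer_instance

-- ===== CLAIM (what is proved, stated in full; the proofs are below) =====
def Claim_equal_parse_with_brackets : Prop := ∀ (keyword : String) (text : String), Dom_parse_with_brackets keyword text → Spec_parse_with_brackets keyword text (parse_with_brackets keyword text)

-- ===== LEMMAS AND PROOFS =====

theorem pvBraceScan_ge (t : List Char) (f j : Nat) (lvl : Int) : j ≤ (pvBraceScan t f j lvl).1 := by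
  induction f generalizing j lvl with
  | zero => simp [pvBraceScan]
  | succ f ih =>
    rw [pvBraceScan]
    split
    · exact le_trans (by omega) (ih (j + 1) _)
    · simp

theorem pvBraceScan_at_len (t : List Char) (f j : Nat) (lvl : Int) (h : t.length ≤ j) :
    pvBraceScan t f j lvl = (j, lvl) := by
  cases f with
  | zero => rfl
  | succ f => rw [pvBraceScan]; rw [dif_neg (by omega)]

theorem pvBraceScan_fuel (t : List Char) (f1 f2 j : Nat) (lvl : Int)
    (h1 : t.length ≤ j + f1) (h2 : t.length ≤ j + f2) :
    pvBraceScan t f1 j lvl = pvBraceScan t f2 j lvl := by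
  induction f1 generalizing f2 j lvl with
  | zero => rw [pvBraceScan_at_len t 0 j lvl (by omega), pvBraceScan_at_len t f2 j lvl (by omega)]
  | succ f ih =>
    by_cases hj : j < t.length
    · match f2, h2 with
      | 0, h2 => omega
      | f2 + 1, h2 =>
        rw [pvBraceScan, pvBraceScan]
        split
        · exact ih f2 (j + 1) _ (by omega) (by omega)
        · rfl
    · rw [pvBraceScan_at_len t _ j lvl (by omega), pvBraceScan_at_len t f2 j lvl (by omega)]

theorem pvBraceScan_le_len (t : List Char) (f j : Nat) (lvl : Int) (h : j ≤ t.length) :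
    (pvBraceScan t f j lvl).1 ≤ t.length := by
  induction f generalizing j lvl with
  | zero => simpa [pvBraceScan] using h
  | succ f ih =>
    rw [pvBraceScan]
    split
    · next hc => exact ih (j + 1) _ (by omega)
    · simpa using h

theorem pvBraceScan_nopos (t : List Char) (f j : Nat) (lvl : Int) (h : ¬ 0 < lvl) :
    pvBraceScan t f j lvl = (j, lvl) := by
  cases f with
  | zero => rfl
  | succ f => rw [pvBraceScan]; rw [dif_neg (by tauto)]

theorem findFrom_len (t sub : List Char) (hsub : sub ≠ []) :
    PySem.Chars.findFrom t sub ((t.length : Nat) : Int) none = -1 := by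
  rw [PySem.Chars.findFrom_natCast_eq_neg_one_iff t sub t.length (le_refl _)]
  simp [hsub]

-- Once the scanner is past p (p < n) and p is not on the stack, pass 1 never touches key p.
theorem pass1_get_stable (rest : List Char) (n : Nat) (stack : List Nat) (m : PySem.Dict Int Int)
    (p : Nat) (hn : p < n) (hs : p ∉ stack) :
    (pvPass1 rest n stack m).get? (p : Int) = m.get? (p : Int) := by
  induction rest generalizing n stack m with
  | nil => rfl
  | cons c cs ih =>
    rw [pvPass1.eq_def]
    dsimp only
    by_cases h1 : c = '{'
    · rw [if_pos h1]
      exact ih (n + 1) (n :: stack) m (by omega) (by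
        intro hmem
        rcases List.mem_cons.1 hmem with h | h
        · omega
        · exact hs h)
    · rw [if_neg h1]
      by_cases h2 : c = '}'
      · rw [if_pos h2]
        match stack, hs with
        | [], hs => exact ih (n + 1) [] m (by omega) (by simp)
        | q :: ps, hs =>
          have hq : q ≠ p := fun e => hs (by simp [e])
          exact (ih (n + 1) ps _ (by omega) (fun h => hs (List.mem_cons_of_mem _ h))).trans
            (PySem.Dict.get?_insert_of_ne _ _ (by omega))
      · rw [if_neg h2]
        exact ih (n + 1) stack m (by omega) hs

-- If the depth scan from n at level lvl = |extra|+1 returns to 0, the stack pass pops everything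
-- down to p exactly at the scan's stopping point and records p ↦ (stop - 1).
theorem pass1_balanced (t : List Char) (f n : Nat) (lvl : Int) (extra stack : List Nat)
    (m : PySem.Dict Int Int) (p : Nat)
    (hf : t.length ≤ n + f) (hpn : p < n) (hpe : p ∉ extra) (hps : p ∉ stack)
    (hlvl : lvl = extra.length + 1)
    (hz : (pvBraceScan t t.length n lvl).2 = 0) :
    (pvPass1 (t.drop n) n (extra ++ p :: stack) m).get? (p : Int)
      = some (((pvBraceScan t t.length n lvl).1 : Int) - 1) := by
  induction f generalizing n lvl extra m with
  | zero =>
    rw [pvBraceScan_at_len t t.length n lvl (by omega)] at hz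
    simp at hz; omega
  | succ f ih =>
    by_cases hn : n < t.length
    · have hsc : pvBraceScan t t.length n lvl = pvBraceScan t (f + 1) n lvl :=
        pvBraceScan_fuel t t.length (f + 1) n lvl (by omega) (by omega)
      rw [hsc] at hz ⊢
      rw [pvBraceScan] at hz ⊢
      rw [dif_pos (⟨hn, by omega⟩ : n < t.length ∧ 0 < lvl)] at hz ⊢
      rw [List.drop_eq_getElem_cons hn, pvPass1.eq_def]
      dsimp only
      have hsc2 : ∀ lvl' : Int, pvBraceScan t f (n + 1) lvl' = pvBraceScan t t.length (n + 1) lvl' :=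
        fun lvl' => pvBraceScan_fuel t f t.length (n + 1) lvl' (by omega) (by omega)
      by_cases h1 : t[n] = '{'
      · simp only [if_pos h1] at hz ⊢
        rw [hsc2] at hz ⊢
        exact ih (n + 1) (lvl + 1) (n :: extra) m (by omega) (by omega)
          (by
            intro hmem
            rcases List.mem_cons.1 hmem with h | h
            · omega
            · exact hpe h)
          (by simp [hlvl]) hz
      · simp only [if_neg h1] at hz ⊢
        by_cases h2 : t[n] = '}'
        · simp only [if_pos h2] at hz ⊢
          by_cases h3 : lvl = 1
          · have hee : extra = [] := by
              have : extra.length = 0 := by omega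
              exact List.eq_nil_of_length_eq_zero this
            subst hee
            rw [h3] at hz ⊢
            rw [show (1 : Int) - 1 = 0 from rfl] at hz ⊢
            rw [pvBraceScan_nopos t f (n + 1) 0 (by norm_num)] at hz ⊢
            have hval : ((n : Int)) = ((n + 1 : Nat) : Int) - 1 := by push_cast; ring
            exact ((pass1_get_stable (t.drop (n + 1)) (n + 1) stack
                (m.insert (p : Int) (n : Int)) p (by omega) hps).trans
              (PySem.Dict.get?_insert_self _ _ _)).trans (by rw [hval])
          · match extra, hpe, hlvl with
            | [], _, hlvl => simp at hlvl; omega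
            | e :: extra', hpe, hlvl =>
              rw [hsc2] at hz ⊢
              exact ih (n + 1) (lvl - 1) extra' (m.insert (e : Int) (n : Int)) (by omega)
                (by omega) (fun h => hpe (List.mem_cons_of_mem _ h))
                (by simp at hlvl ⊢; omega) hz
        · simp only [if_neg h2] at hz ⊢
          rw [hsc2] at hz ⊢
          exact ih (n + 1) lvl extra m (by omega) (by omega) hpe hlvl hz
    · rw [pvBraceScan_at_len t t.length n lvl (by omega)] at hz
      simp at hz; omega

-- If the depth scan never returns to 0, p is never popped and key p is never written.
theorem pass1_unbalanced (t : List Char) (f n : Nat) (lvl : Int) (extra stack : List Nat)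
    (m : PySem.Dict Int Int) (p : Nat)
    (hf : t.length ≤ n + f) (hpn : p < n) (hpe : p ∉ extra) (_hps : p ∉ stack)
    (hlvl : lvl = extra.length + 1)
    (hz : (pvBraceScan t t.length n lvl).2 ≠ 0) :
    (pvPass1 (t.drop n) n (extra ++ p :: stack) m).get? (p : Int) = m.get? (p : Int) := by
  induction f generalizing n lvl extra m with
  | zero =>
    rw [List.drop_eq_nil_of_le (by omega)]
    rfl
  | succ f ih =>
    by_cases hn : n < t.length
    · have hsc : pvBraceScan t t.length n lvl = pvBraceScan t (f + 1) n lvl :=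
        pvBraceScan_fuel t t.length (f + 1) n lvl (by omega) (by omega)
      rw [hsc] at hz
      rw [pvBraceScan] at hz
      rw [dif_pos (⟨hn, by omega⟩ : n < t.length ∧ 0 < lvl)] at hz
      rw [List.drop_eq_getElem_cons hn, pvPass1.eq_def]
      dsimp only
      have hsc2 : ∀ lvl' : Int, pvBraceScan t f (n + 1) lvl' = pvBraceScan t t.length (n + 1) lvl' :=
        fun lvl' => pvBraceScan_fuel t f t.length (n + 1) lvl' (by omega) (by omega)
      by_cases h1 : t[n] = '{'
      · simp only [if_pos h1] at hz ⊢
        rw [hsc2] at hz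
        exact ih (n + 1) (lvl + 1) (n :: extra) m (by omega) (by omega)
          (by
            intro hmem
            rcases List.mem_cons.1 hmem with h | h
            · omega
            · exact hpe h)
          (by simp [hlvl]) hz
      · simp only [if_neg h1] at hz ⊢
        by_cases h2 : t[n] = '}'
        · simp only [if_pos h2] at hz ⊢
          by_cases h3 : lvl = 1
          · exfalso
            rw [h3] at hz
            rw [show (1 : Int) - 1 = 0 from rfl] at hz
            rw [pvBraceScan_nopos t f (n + 1) 0 (by norm_num)] at hz
            exact hz rfl
          · match extra, hpe, hlvl with
            | [], _, hlvl => simp at hlvl; omega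
            | e :: extra', hpe, hlvl =>
              have he : e ≠ p := fun hh => hpe (by simp [hh])
              rw [hsc2] at hz
              exact (ih (n + 1) (lvl - 1) extra' (m.insert (e : Int) (n : Int)) (by omega)
                  (by omega) (fun h => hpe (List.mem_cons_of_mem _ h))
                  (by simp at hlvl ⊢; omega) hz).trans
                (PySem.Dict.get?_insert_of_ne _ _ (by omega))
        · simp only [if_neg h2] at hz ⊢
          rw [hsc2] at hz
          exact ih (n + 1) lvl extra m (by omega) (by omega) hpe hlvl hz
    · rw [List.drop_eq_nil_of_le (by omega)]
      rfl

-- Running pass 1 from any point n ≤ p up to the '{' at p: the final table maps p to the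
-- stopping point of A's depth scan from p+1, or leaves key p untouched if that scan never closes.
theorem pass1_reach (t : List Char) (f n : Nat) (stack : List Nat) (m : PySem.Dict Int Int)
    (p : Nat) (hp : p < t.length) (hchar : t[p]'hp = '{')
    (hf : t.length ≤ n + f) (hnp : n ≤ p) (hst : ∀ q ∈ stack, q < n) :
    (pvPass1 (t.drop n) n stack m).get? (p : Int)
      = if (pvBraceScan t t.length (p + 1) 1).2 = 0 then
          some (((pvBraceScan t t.length (p + 1) 1).1 : Int) - 1)
        else m.get? (p : Int) := by
  induction f generalizing n stack m with
  | zero => omega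
  | succ f ih =>
    have hn : n < t.length := by omega
    rw [List.drop_eq_getElem_cons hn, pvPass1.eq_def]
    dsimp only
    by_cases hnpeq : n = p
    · subst hnpeq
      rw [if_pos hchar]
      have hps : n ∉ stack := fun h => absurd (hst n h) (by omega)
      by_cases hz : (pvBraceScan t t.length (n + 1) 1).2 = 0
      · rw [if_pos hz]
        exact pass1_balanced t f (n + 1) 1 [] stack m n (by omega) (by omega) (by simp) hps
          (by simp) hz
      · rw [if_neg hz]
        exact pass1_unbalanced t f (n + 1) 1 [] stack m n (by omega) (by omega) (by simp) hps
          (by simp) hz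
    · have hlt : n < p := by omega
      by_cases h1 : t[n] = '{'
      · rw [if_pos h1]
        exact ih (n + 1) (n :: stack) m (by omega) (by omega)
          (by
            intro q hq
            rcases List.mem_cons.1 hq with h | h
            · omega
            · have := hst q h; omega)
      · rw [if_neg h1]
        by_cases h2 : t[n] = '}'
        · rw [if_pos h2]
          match stack, hst with
          | [], hst => exact ih (n + 1) [] m (by omega) (by omega) (by simp)
          | q :: ps, hst =>
            have hq : q ≠ p := by have := hst q (by simp); omega
            exact (ih (n + 1) ps (m.insert (q : Int) (n : Int)) (by omega) (by omega)
                (fun r hr => by have := hst r (List.mem_cons_of_mem _ hr); omega)).trans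
              (by rw [PySem.Dict.get?_insert_of_ne _ _ (by omega)])
        · rw [if_neg h2]
          exact ih (n + 1) stack m (by omega) (by omega)
            (fun q hq => by have := hst q hq; omega)

-- The global matching table agrees with A's local depth scan at every opening brace.
theorem pass1_match (t : List Char) (p : Nat) (hp : p < t.length) (hchar : t[p]'hp = '{') :
    (pvPass1 t 0 [] PySem.Dict.empty).get? (p : Int)
      = if (pvBraceScan t t.length (p + 1) 1).2 = 0 then
          some (((pvBraceScan t t.length (p + 1) 1).1 : Int) - 1)
        else none := by
  have h := pass1_reach t t.length 0 [] PySem.Dict.empty p hp hchar (by omega) (by omega) (by simp)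
  simp only [List.drop_zero] at h
  rw [h]
  by_cases hz : (pvBraceScan t t.length (p + 1) 1).2 = 0
  · rw [if_pos hz, if_pos hz]
  · rw [if_neg hz, if_neg hz, PySem.Dict.get?_empty]

theorem outer_eq (kw t : List Char) (f i : Nat)
    (hf : t.length ≤ i + f) (hi : i ≤ t.length) :
    pvAOuter kw t f i = pvBOuter kw t (pvPass1 t 0 [] PySem.Dict.empty) (f + 1) i := by
  induction f generalizing i with
  | zero =>
    have hie : i = t.length := by omega
    subst hie
    rw [pvAOuter, pvBOuter]
    rw [if_pos (findFrom_len t (kw ++ ['{']) (by simp))]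
  | succ f ih =>
    rw [pvAOuter, pvBOuter]
    by_cases hil : i < t.length
    · rw [if_pos hil]
      by_cases hff : PySem.Chars.findFrom t (kw ++ ['{']) (i : Int) none = -1
      · rw [if_pos hff, if_pos hff]
      · rw [if_neg hff, if_neg hff]
        have spec := PySem.Chars.findFrom_natCast_spec t (kw ++ ['{']) i (by omega) hff
        have hs0 : (i : Int) ≤ PySem.Chars.findFrom t (kw ++ ['{']) (i : Int) none := spec.1
        have hpre : (kw ++ ['{']) <+: t.drop (PySem.Chars.findFrom t (kw ++ ['{']) (i : Int) none).toNat := spec.2.1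
        have hlenle : kw.length + 1 ≤ t.length - (PySem.Chars.findFrom t (kw ++ ['{']) (i : Int) none).toNat := by
          have := hpre.length_le
          simpa using this
        have hopenlt : (PySem.Chars.findFrom t (kw ++ ['{']) (i : Int) none).toNat + kw.length < t.length := by omega
        have hchar : t[(PySem.Chars.findFrom t (kw ++ ['{']) (i : Int) none).toNat + kw.length]'hopenlt = '{' := by
          have h1 := (hpre.getElem (i := kw.length) (by simp)).symm
          rw [List.getElem_drop] at h1
          simpa using h1
        have hmatch := pass1_match t _ hopenlt hchar
        have hklen : (kw ++ ['{']).length = kw.length + 1 := by simp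
        rw [hklen]
        simp only [← Nat.add_assoc]
        by_cases hz : (pvBraceScan t t.length ((PySem.Chars.findFrom t (kw ++ ['{']) (i : Int) none).toNat + kw.length + 1) 1).2 = 0
        · rw [if_pos hz]
          rw [if_pos hz] at hmatch
          have hcont : (pvPass1 t 0 [] PySem.Dict.empty).contains
              (((PySem.Chars.findFrom t (kw ++ ['{']) (i : Int) none).toNat + kw.length : Nat) : Int) = true := by
            rw [PySem.Dict.contains_eq_isSome_get?, hmatch]
            rfl
          have hgetD : (pvPass1 t 0 [] PySem.Dict.empty).getD
              (((PySem.Chars.findFrom t (kw ++ ['{']) (i : Int) none).toNat + kw.length : Nat) : Int) 0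
              = ((pvBraceScan t t.length ((PySem.Chars.findFrom t (kw ++ ['{']) (i : Int) none).toNat + kw.length + 1) 1).1 : Int) - 1 := by
            rw [PySem.Dict.getD_eq_get?_getD, hmatch]
            rfl
          rw [if_neg (by rw [hcont]; simp), hgetD]
          have hge := pvBraceScan_ge t t.length ((PySem.Chars.findFrom t (kw ++ ['{']) (i : Int) none).toNat + kw.length + 1) 1
          have hle := pvBraceScan_le_len t t.length ((PySem.Chars.findFrom t (kw ++ ['{']) (i : Int) none).toNat + kw.length + 1) 1 (by omega)
          have htn : ((((pvBraceScan t t.length ((PySem.Chars.findFrom t (kw ++ ['{']) (i : Int) none).toNat + kw.length + 1) 1).1 : Int) - 1)).toNat + 1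
              = (pvBraceScan t t.length ((PySem.Chars.findFrom t (kw ++ ['{']) (i : Int) none).toNat + kw.length + 1) 1).1 := by omega
          rw [htn, ih _ (by omega) (by omega)]
        · rw [if_neg hz]
          rw [if_neg hz] at hmatch
          have hcont : (pvPass1 t 0 [] PySem.Dict.empty).contains
              (((PySem.Chars.findFrom t (kw ++ ['{']) (i : Int) none).toNat + kw.length : Nat) : Int) = false := by
            rw [PySem.Dict.contains_eq_isSome_get?, hmatch]
            rfl
          rw [if_pos hcont]
    · rw [if_neg hil]
      have hie : i = t.length := by omega
      subst hie
      rw [if_pos (findFrom_len t (kw ++ ['{']) (by simp))]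

-- ===== VERDICT (by name: the statement is the Claim_ definition above) =====
theorem parse_with_brackets_spec : Claim_equal_parse_with_brackets := by
  intro keyword text _
  unfold Spec_parse_with_brackets parse_with_brackets parse_with_brackets_alt
  exact outer_eq keyword.toList text.toList text.toList.length 0 (by omega) (by omega)
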